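-- pv_equiv track=rewrite | github.com/pranav3764/dashboard | nifty_feed.py | filter_instruments
-- ===== SOURCE A (Python) =====
-- def filter_instruments(instruments, symbol_name, exchange):
--     """Return all FUT and OPT contracts for the given symbol."""
--     seg_fut = f"{exchange}-FUT"
--     seg_opt = f"{exchange}-OPT"
--     fut = [i for i in instruments
--            if i["segment"] == seg_fut and i["name"] == symbol_name]
--     opt = [i for i in instruments
--            if i["segment"] == seg_opt and i["name"] == symbol_name]
--     return fut, opt
-- ===== SOURCE B (Python) =====
-- def filter_instruments(instruments, symbol_name, exchange):
--     """Return all FUT and OPT contracts for the given symbol.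
--
--     Builds a one-pass index of instruments keyed by segment, then filters
--     by name only the two buckets that matter."""
--     by_segment = {}
--     for i in instruments:
--         by_segment.setdefault(i["segment"], []).append(i)
--     fut = [i for i in by_segment.get(f"{exchange}-FUT", []) if i["name"] == symbol_name]
--     opt = [i for i in by_segment.get(f"{exchange}-OPT", []) if i["name"] == symbol_name]
--     return fut, opt
-- ===== Notes on version B (the rewrite author's own statement) =====
-- stated objective: alternative
-- what changed: Replaces A's two filtering scans comparing each item's segment against both target strings with a one-pass dict index grouping items by segment, after which only the two relevant buckets are filtered by name.
import Mathlib
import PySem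

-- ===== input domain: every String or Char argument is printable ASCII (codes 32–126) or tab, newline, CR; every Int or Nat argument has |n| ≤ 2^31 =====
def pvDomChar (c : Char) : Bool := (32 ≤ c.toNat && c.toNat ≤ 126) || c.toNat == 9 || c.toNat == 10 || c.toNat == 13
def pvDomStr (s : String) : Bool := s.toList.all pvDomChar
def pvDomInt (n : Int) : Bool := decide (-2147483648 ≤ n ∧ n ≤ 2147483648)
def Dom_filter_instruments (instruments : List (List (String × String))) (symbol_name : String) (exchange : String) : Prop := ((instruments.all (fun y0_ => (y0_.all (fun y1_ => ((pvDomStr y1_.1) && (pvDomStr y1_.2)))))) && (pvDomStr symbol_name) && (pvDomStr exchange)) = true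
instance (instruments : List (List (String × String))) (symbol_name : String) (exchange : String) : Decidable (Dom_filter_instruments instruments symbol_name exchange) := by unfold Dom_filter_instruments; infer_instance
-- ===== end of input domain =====

-- B replaces A's paired filtering scans with a dict index grouping items by segment,
-- then filters by name only the two relevant buckets; objective: alternative.

-- ===== PORT A =====
-- i[k] on the assoc-list dict: first-match lookup; exact when the key is present (guaranteed by Pre_);
-- Python raises KeyError on a missing key (excluded by Pre_; the .getD "" default is never reached there).
def pvGetKey (d : List (String × String)) (k : String) : String :=
  ((PySem.Dict.mk d).get? k).getD ""

def filter_instruments (instruments : List (List (String × String))) (symbol_name : String) (exchange : String) : (List (List (String × String))) × (List (List (String × String))) :=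
  let seg_fut := exchange ++ "-FUT"
  let seg_opt := exchange ++ "-OPT"
  let fut := instruments.filter (fun i => pvGetKey i "segment" == seg_fut && pvGetKey i "name" == symbol_name)
  let opt := instruments.filter (fun i => pvGetKey i "segment" == seg_opt && pvGetKey i "name" == symbol_name)
  (fut, opt)

-- ===== PORT B =====
-- by_segment.setdefault(i["segment"], []).append(i) ported as getD-then-insert (same dict value).
def filter_instruments_alt (instruments : List (List (String × String))) (symbol_name : String) (exchange : String) : (List (List (String × String))) × (List (List (String × String))) :=
  let by_segment := instruments.foldl
    (fun g i =>
      let seg := pvGetKey i "segment"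
      g.insert seg ((g.getD seg []) ++ [i]))
    (PySem.Dict.mk [])
  let fut := (by_segment.getD (exchange ++ "-FUT") []).filter (fun i => pvGetKey i "name" == symbol_name)
  let opt := (by_segment.getD (exchange ++ "-OPT") []).filter (fun i => pvGetKey i "name" == symbol_name)
  (fut, opt)

-- ===== PRECONDITION & SPEC =====
-- Pre_ excludes exactly the inputs where Python A raises KeyError: an item without a "segment" key,
-- or an item whose segment is the FUT or OPT segment but which has no "name" key.
def Pre_filter_instruments (instruments : List (List (String × String))) (symbol_name : String) (exchange : String) : Prop :=
  ∀ i ∈ instruments,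
    ((PySem.Dict.mk i).get? "segment").isSome ∧
    ((((PySem.Dict.mk i).get? "segment").getD "" = exchange ++ "-FUT" ∨
      ((PySem.Dict.mk i).get? "segment").getD "" = exchange ++ "-OPT") →
     ((PySem.Dict.mk i).get? "name").isSome)
instance (instruments : List (List (String × String))) (symbol_name : String) (exchange : String) : Decidable (Pre_filter_instruments instruments symbol_name exchange) := by unfold Pre_filter_instruments; infer_instance

def pvWitness_filter_instruments : (List (List (String × String))) × String × String :=
  ([[("segment", "NSE-FUT"), ("name", "TCS")], [("segment", "NSE-OPT"), ("name", "TCS")], [("segment", "BSE-X")]], "TCS", "NSE")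

def Spec_filter_instruments (instruments : List (List (String × String))) (symbol_name : String) (exchange : String) (out : (List (List (String × String))) × (List (List (String × String)))) : Prop := out = filter_instruments_alt instruments symbol_name exchange
instance (instruments : List (List (String × String))) (symbol_name : String) (exchange : String) (out : (List (List (String × String))) × (List (List (String × String)))) : Decidable (Spec_filter_instruments instruments symbol_name exchange out) := by unfold Spec_filter_instruments; infer_instance

-- ===== CLAIM (what is proved, stated in full; the proofs are below) =====
def Claim_equal_filter_instruments : Prop := ∀ (instruments : List (List (String × String))) (symbol_name : String) (exchange : String), Dom_filter_instruments instruments symbol_name exchange → Pre_filter_instruments instruments symbol_name exchange → Spec_filter_instruments instruments symbol_name exchange (filter_instruments instruments symbol_name exchange)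

-- ===== LEMMAS AND PROOFS =====

theorem pvWitness_ok :
    Dom_filter_instruments pvWitness_filter_instruments.1 pvWitness_filter_instruments.2.1 pvWitness_filter_instruments.2.2 ∧
    Pre_filter_instruments pvWitness_filter_instruments.1 pvWitness_filter_instruments.2.1 pvWitness_filter_instruments.2.2 := by
  decide

-- The grouping fold's bucket at k is exactly the sublist of items whose segment equals k.
theorem group_getD (xs : List (List (String × String))) (g : PySem.Dict String (List (List (String × String)))) (k : String) :
    (xs.foldl (fun g i =>
        let seg := pvGetKey i "segment"
        g.insert seg ((g.getD seg []) ++ [i])) g).getD k []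
      = g.getD k [] ++ xs.filter (fun i => pvGetKey i "segment" == k) := by
  induction xs generalizing g with
  | nil => simp
  | cons i rest ih =>
    simp only [List.foldl_cons, List.filter_cons, ih]
    by_cases h : pvGetKey i "segment" = k
    · subst h
      simp [PySem.Dict.getD_insert_self]
    · have hb : (pvGetKey i "segment" == k) = false := by simpa using h
      rw [PySem.Dict.getD_insert, if_neg (Ne.symm h)]
      simp [hb]

-- ===== VERDICT (by name: the statement is the Claim_ definition above) =====
theorem filter_instruments_spec : Claim_equal_filter_instruments := by
  intro instruments symbol_name exchange _ _
  unfold Spec_filter_instruments filter_instruments filter_instruments_alt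
  simp only [group_getD]
  simp [List.filter_filter, Bool.and_comm, PySem.Dict.getD, PySem.Dict.get?]
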